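-- pv_equiv track=rewrite | github.com/nooncatt/Algorithms | Sorting/algo_hw1M.py | get_nul_optimal
-- ===== SOURCE A (Python) =====
-- def get_nul_optimal(arr):
--     new_arr = []
--     new_arr.append(arr[0])
--     # check if we have the same elements next to each other
--     for i in range(1, len(arr)):
--         if arr[i] != arr[i - 1]:
--             new_arr.append(arr[i])
--     # if the small element is between large elements, it will take more operations than it's not
--     for i in range(1, len(new_arr) - 1):
--         if new_arr[i - 1] > new_arr[i] and new_arr[i] < new_arr[i + 1]:
--             return "NO"
--     return "YES"
-- ===== SOURCE B (Python) =====
-- def get_nul_optimal(arr):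
--     prev = arr[0]          # IndexError on empty input, like A
--     prevprev = None
--     for cur in arr[1:]:
--         if cur == prev:
--             continue
--         if prevprev is not None and prevprev > prev and prev < cur:
--             return "NO"
--         prevprev, prev = prev, cur
--     return "YES"
-- ===== Notes on version B (the rewrite author's own statement) =====
-- stated objective: simpler
-- what changed: Replaces A's two passes (build a deduplicated copy of the list, then index-scan it for a local minimum) with one streaming pass that keeps only the last two distinct values and never builds the intermediate list.
import Mathlib
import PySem

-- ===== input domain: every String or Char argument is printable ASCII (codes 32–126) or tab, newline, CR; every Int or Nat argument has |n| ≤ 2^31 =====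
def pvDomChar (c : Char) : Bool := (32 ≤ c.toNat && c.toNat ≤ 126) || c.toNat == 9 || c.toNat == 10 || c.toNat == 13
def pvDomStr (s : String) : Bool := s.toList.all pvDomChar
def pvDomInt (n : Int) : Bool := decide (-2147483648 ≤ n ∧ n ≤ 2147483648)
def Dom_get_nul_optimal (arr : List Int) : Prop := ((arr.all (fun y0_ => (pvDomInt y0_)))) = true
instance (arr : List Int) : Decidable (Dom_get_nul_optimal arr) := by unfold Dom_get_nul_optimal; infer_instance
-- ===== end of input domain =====

-- B fuses A's dedup pass and index scan into one streaming pass over the list,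
-- keeping only the last two distinct values (O(1) extra space instead of a copy).
-- ===== PORT A =====
-- first loop: new_arr gets arr[i] whenever arr[i] != arr[i-1] (p carries arr[i-1])
def pvDedup (p : Int) : List Int → List Int
  | [] => []
  | x :: xs => if x ≠ p then x :: pvDedup x xs else pvDedup x xs

-- second loop: for i in range(1, len(new_arr)-1), return "NO" on the first local minimum
def pvScan : List Int → String
  | a :: b :: c :: rest => if a > b ∧ b < c then "NO" else pvScan (b :: c :: rest)
  | _ => "YES"

def get_nul_optimal (arr : List Int) : String :=
  match arr with
  | [] => ""          -- Python raises IndexError on arr[0]; excluded by Pre_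
  | a :: rest => pvScan (a :: pvDedup a rest)

-- ===== PORT B =====
-- one pass: prevprev (Option) and prev are the last two distinct values seen
def pvStream (prevprev : Option Int) (prev : Int) : List Int → String
  | [] => "YES"
  | cur :: rest =>
    if cur = prev then pvStream prevprev prev rest
    else
      match prevprev with
      | some q => if q > prev ∧ prev < cur then "NO" else pvStream (some prev) cur rest
      | none => pvStream (some prev) cur rest

def get_nul_optimal_alt (arr : List Int) : String :=
  match arr with
  | [] => ""          -- arr[0] raises IndexError in Python; excluded by Pre_
  | a :: rest => pvStream none a rest

-- ===== PRECONDITION & SPEC =====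
-- Python A evaluates arr[0] and raises IndexError on the empty list.
def Pre_get_nul_optimal (arr : List Int) : Prop := arr ≠ []
instance (arr : List Int) : Decidable (Pre_get_nul_optimal arr) := by unfold Pre_get_nul_optimal; infer_instance
def pvWitness_get_nul_optimal : List Int := [2, 1, 2]
def Spec_get_nul_optimal (arr : List Int) (out : String) : Prop := out = get_nul_optimal_alt arr
instance (arr : List Int) (out : String) : Decidable (Spec_get_nul_optimal arr out) := by unfold Spec_get_nul_optimal; infer_instance

-- ===== CLAIM (what is proved, stated in full; the proofs are below) =====
def Claim_equal_get_nul_optimal : Prop := ∀ (arr : List Int), Dom_get_nul_optimal arr → Pre_get_nul_optimal arr → Spec_get_nul_optimal arr (get_nul_optimal arr)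

-- ===== LEMMAS AND PROOFS =====
-- The streaming pass computes exactly the triple scan of the deduplicated list.
theorem pvStream_eq_pvScan (rest : List Int) : ∀ (p : Int),
    pvStream none p rest = pvScan (p :: pvDedup p rest) ∧
    ∀ (q : Int), pvStream (some q) p rest = pvScan (q :: p :: pvDedup p rest) := by
  induction rest with
  | nil => intro p; simp [pvStream, pvDedup, pvScan]
  | cons x xs ih =>
    intro p
    by_cases hx : x = p
    · subst hx
      simpa [pvStream, pvDedup] using ih x
    · constructor
      · simp [pvStream, pvDedup, hx, (ih x).2 p]
      · intro q
        simp [pvStream, pvDedup, hx]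
        rw [(ih x).2 p]
        by_cases hqp : q > p ∧ p < x
        · simp [pvScan, hqp]
        · simp [pvScan, hqp]

-- ===== VERDICT (by name: the statement is the Claim_ definition above) =====
theorem get_nul_optimal_spec : Claim_equal_get_nul_optimal := by
  intro arr _ hpre
  unfold Spec_get_nul_optimal
  cases arr with
  | nil => exact absurd rfl hpre
  | cons a rest =>
    simp [get_nul_optimal, get_nul_optimal_alt, (pvStream_eq_pvScan rest a).1]
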